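-- pv_equiv track=rewrite | github.com/RunningPie/SwiftStock | streamlit_mvp/streamlit_app.py | run_chat_action
-- ===== SOURCE A (Python) =====
-- def run_chat_action(user_query, valid_items):
--     """
--     Identifies the medical item from the user's query.
--     """
--     user_query = user_query.lower()
--     # Sort by length to match "Amoxicillin 500mg" before "Amoxicillin"
--     valid_items = sorted(valid_items, key=len, reverse=True)
--
--     for item in valid_items:
--         simple_name = item.split(" ")[0].lower() # e.g. "oxytocin"
--         # Check full name or simple name
--         if item.lower() in user_query or simple_name in user_query:
--             return item
--     return None
-- ===== SOURCE B (Python) =====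
-- def run_chat_action(user_query, valid_items):
--     """
--     Identifies the medical item from the user's query.
--     """
--     q = user_query.lower()
--     best = None
--     for item in valid_items:
--         # only an item strictly longer than the current best can improve it,
--         # so shorter/equal items are skipped without a substring test;
--         # strict > keeps the earliest of the longest matches
--         if (best is None or len(best) < len(item)) and \
--                 (item.lower() in q or item.split(" ")[0].lower() in q):
--             best = item
--     return best
-- ===== Notes on version B (the rewrite author's own statement) =====
-- stated objective: alternative
-- what changed: Replaced the length-descending stable sort followed by an early-exit scan with a single sort-free pass keeping a running best, substring-testing only items strictly longer than the current best (strict > reproduces the stable-sort tie-break of earliest among the longest).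
import Mathlib
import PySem

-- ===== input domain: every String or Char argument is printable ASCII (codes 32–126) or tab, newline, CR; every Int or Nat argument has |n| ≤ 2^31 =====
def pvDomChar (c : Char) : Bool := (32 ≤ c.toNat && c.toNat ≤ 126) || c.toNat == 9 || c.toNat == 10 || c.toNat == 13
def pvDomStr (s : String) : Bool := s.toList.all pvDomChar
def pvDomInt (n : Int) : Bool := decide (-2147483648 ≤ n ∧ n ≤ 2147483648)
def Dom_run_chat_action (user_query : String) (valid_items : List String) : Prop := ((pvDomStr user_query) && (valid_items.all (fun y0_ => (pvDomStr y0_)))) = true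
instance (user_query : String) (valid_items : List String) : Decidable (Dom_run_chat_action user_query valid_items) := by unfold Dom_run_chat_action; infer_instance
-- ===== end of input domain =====

-- B replaces A's length-descending stable sort + early-exit scan by one sort-free pass keeping a
-- running best, substring-testing only items strictly longer than the current best (same return value).

-- ===== PORT A =====
-- simple_name = item.split(" ")[0].lower() : split by " " always yields a nonempty list, [0] is its head
def pvSimpleName (item : String) : String :=
  PySem.Str.lower (((PySem.Str.split? item " ").getD []).headD "")

-- the for-loop with early return, as structural recursion over the sorted list
def pvLoopA (uq : String) : List String → Option String
  | [] => none
  | item :: rest =>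
      if PySem.Str.isIn (PySem.Str.lower item) uq || PySem.Str.isIn (pvSimpleName item) uq then
        some item
      else pvLoopA uq rest

def run_chat_action (user_query : String) (valid_items : List String) : Option String :=
  let uq := PySem.Str.lower user_query
  let sortedItems := PySem.List.sorted valid_items (fun item => PySem.Str.len item) true
  pvLoopA uq sortedItems

-- ===== PORT B =====
def pvMatchesB (uq item : String) : Bool :=
  PySem.Str.isIn (PySem.Str.lower item) uq ||
    PySem.Str.isIn (PySem.Str.lower (((PySem.Str.split? item " ").getD []).headD "")) uq

-- the running-best loop: test only items strictly longer than the current best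
def pvLoopB (q : String) : List String → Option String → Option String
  | [], best => best
  | item :: rest, best =>
      if (match best with
          | none => true
          | some b => decide (PySem.Str.len b < PySem.Str.len item)) && pvMatchesB q item then
        pvLoopB q rest (some item)
      else
        pvLoopB q rest best

def run_chat_action_alt (user_query : String) (valid_items : List String) : Option String :=
  let q := PySem.Str.lower user_query
  pvLoopB q valid_items none

-- ===== PRECONDITION & SPEC =====
def Spec_run_chat_action (user_query : String) (valid_items : List String) (out : Option String) : Prop := out = run_chat_action_alt user_query valid_items
instance (user_query : String) (valid_items : List String) (out : Option String) : Decidable (Spec_run_chat_action user_query valid_items out) := by unfold Spec_run_chat_action; infer_instance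

-- ===== CLAIM (what is proved, stated in full; the proofs are below) =====
def Claim_equal_run_chat_action : Prop := ∀ (user_query : String) (valid_items : List String), Dom_run_chat_action user_query valid_items → Spec_run_chat_action user_query valid_items (run_chat_action user_query valid_items)

-- ===== LEMMAS AND PROOFS =====

-- A's loop is find? over the list, with the same predicate as B
theorem pvLoopA_eq_find? (uq : String) (l : List String) :
    pvLoopA uq l = l.find? (pvMatchesB uq) := by
  induction l with
  | nil => rfl
  | cons x t ih =>
      show (if pvMatchesB uq x = true then some x else pvLoopA uq t) = _
      rw [List.find?]
      cases hb : pvMatchesB uq x <;> simp [ih]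

-- first match after inserting x into a length-descending sorted list
theorem find?_insertBy (key : String → Int) (p : String → Bool) (x : String) (s : List String)
    (hs : s.Pairwise (fun a b => key b ≤ key a)) :
    (PySem.List.insertBy (fun a b => decide (key b < key a)) x s).find? p =
      match s.find? p with
      | none => if p x then some x else none
      | some m => if p x ∧ key m < key x then some x else some m := by
  induction s with
  | nil =>
      simp only [PySem.List.insertBy, List.find?]
      cases p x <;> rfl
  | cons y t ih =>
      have hpair := (List.pairwise_cons.mp hs).1
      have ht := (List.pairwise_cons.mp hs).2
      by_cases hlt : key y < key x
      · -- x inserted in front of y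
        simp only [PySem.List.insertBy, hlt, decide_true, if_true]
        by_cases hpx : p x
        · rw [List.find?_cons_of_pos hpx]
          cases hfind : List.find? p (y :: t) with
          | none => simp [hpx]
          | some m =>
              have hm : m ∈ y :: t := List.mem_of_find?_eq_some hfind
              have hkm : key m ≤ key y := by
                rcases List.mem_cons.mp hm with h | h
                · simp [h]
                · exact hpair m h
              simp [hpx, lt_of_le_of_lt hkm hlt]
        · rw [List.find?_cons_of_neg (by simp [hpx])]
          cases hfind : List.find? p (y :: t) <;> simp [hpx]
      · -- x goes after y
        simp only [PySem.List.insertBy, hlt, decide_false, Bool.false_eq_true, if_false]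
        by_cases hpy : p y
        · rw [List.find?_cons_of_pos hpy, List.find?_cons_of_pos hpy]
          simp [hlt]
        · rw [List.find?_cons_of_neg (by simp [hpy]), List.find?_cons_of_neg (by simp [hpy])]
          exact ih ht

-- main bridge: first match in the length-descending stable sort = first length-maximal match
theorem find?_sorted_eq_max?_filter (key : String → Int) (p : String → Bool) (vs : List String) :
    (PySem.List.sorted vs key true).find? p =
      PySem.List.max? (vs.filter p) key := by
  induction vs using List.reverseRecOn with
  | nil => rfl
  | append_singleton vs x ih =>
      have hsortapp : PySem.List.sorted (vs ++ [x]) key true =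
          PySem.List.insertBy (fun a b => decide (key b < key a)) x
            (PySem.List.sorted vs key true) := by
        rw [PySem.List.sorted_rev_eq_foldl_insertBy, List.foldl_append,
          ← PySem.List.sorted_rev_eq_foldl_insertBy]
        rfl
      have hpair : (PySem.List.sorted vs key true).Pairwise (fun a b => key b ≤ key a) :=
        PySem.List.sorted_pairwise_rev vs key
      rw [hsortapp, find?_insertBy key p x _ hpair, ih, List.filter_append]
      by_cases hpx : p x
      · simp only [List.filter, hpx, PySem.List.max?, List.foldl_append, List.foldl,
          if_true, true_and]
        split <;> (rename_i h; rw [h])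
      · simp only [List.filter, hpx, Bool.false_eq_true, if_false, List.append_nil,
          PySem.List.max?]
        split
        all_goals (rename_i h; exact h.symm)

-- B's loop is the running max (over length) of the filtered list
theorem pvLoopB_eq_foldl (q : String) (l : List String) (best : Option String) :
    pvLoopB q l best =
      (l.filter (pvMatchesB q)).foldl
        (fun acc x =>
          match acc with
          | none => some x
          | some m => if PySem.Str.len m < PySem.Str.len x then some x else some m)
        best := by
  induction l generalizing best with
  | nil => rfl
  | cons item rest ih =>
      by_cases hp : pvMatchesB q item
      · cases best with
        | none => simp [pvLoopB, hp, List.filter_cons, ih]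
        | some b =>
            by_cases hlt : PySem.Str.len b < PySem.Str.len item
            · have hlt' : b.length < item.length := by simpa [PySem.Str.len] using hlt
              simp [pvLoopB, hp, hlt, hlt', List.filter_cons, ih]
            · have hlt' : ¬ b.length < item.length := by simpa [PySem.Str.len] using hlt
              simp [pvLoopB, hp, hlt, hlt', List.filter_cons, ih]
      · simp [pvLoopB, hp, List.filter_cons, ih]

-- ===== VERDICT (by name: the statement is the Claim_ definition above) =====
theorem run_chat_action_spec : Claim_equal_run_chat_action := by
  intro user_query valid_items _
  unfold Spec_run_chat_action run_chat_action run_chat_action_alt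
  rw [pvLoopA_eq_find?, pvLoopB_eq_foldl,
    find?_sorted_eq_max?_filter (fun item => PySem.Str.len item)
      (pvMatchesB (PySem.Str.lower user_query)) valid_items]
  unfold PySem.List.max?
  congr 1
  funext acc x
  cases acc <;> rfl
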